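-- pv_equiv track=rewrite | github.com/pypi-data/pypi-mirror-1 | packages/smug/smug-0.6b1.tar.gz/smug-0.6b1/smug/load.py | dotsmug_paths
-- ===== SOURCE A (Python) =====
-- def dotsmug_paths(path):
--     """Make a list of the .smug files that should be loaded for a given path.
--
--     >>> dotsmug_paths('path/to/file')
--     ['path/to/.smug', 'path/.smug', '.smug']
--     >>> dotsmug_paths('path/to/dir/')
--     ['path/to/dir/.smug', 'path/to/.smug', 'path/.smug', '.smug']
--     >>>
--     """
--     path_splits = path.split('/')[:-1]
--
--     subpaths = ['']
--     for split in path_splits: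
--         next = subpaths[-1] + split + '/'
--         subpaths.append(next)
--
--     results = [(subpath + '.smug') for subpath in subpaths]
--     results.reverse()
--
--     return results
-- ===== SOURCE B (Python) =====
-- def dotsmug_paths(path):
--     parts = path.split('/')[:-1]
--     results = []
--     while parts:
--         results.append('/'.join(parts) + '/.smug')
--         parts = parts[:-1]
--     results.append('.smug')
--     return results
-- ===== Notes on version B (the rewrite author's own statement) =====
-- stated objective: simpler
-- what changed: Replaces the growing-prefix accumulator (subpaths list indexed with [-1]) plus final list-comprehension and reverse with a direct top-down loop that joins the remaining components and drops the last one each step, producing the descending list in order with no reverse.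
import Mathlib
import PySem

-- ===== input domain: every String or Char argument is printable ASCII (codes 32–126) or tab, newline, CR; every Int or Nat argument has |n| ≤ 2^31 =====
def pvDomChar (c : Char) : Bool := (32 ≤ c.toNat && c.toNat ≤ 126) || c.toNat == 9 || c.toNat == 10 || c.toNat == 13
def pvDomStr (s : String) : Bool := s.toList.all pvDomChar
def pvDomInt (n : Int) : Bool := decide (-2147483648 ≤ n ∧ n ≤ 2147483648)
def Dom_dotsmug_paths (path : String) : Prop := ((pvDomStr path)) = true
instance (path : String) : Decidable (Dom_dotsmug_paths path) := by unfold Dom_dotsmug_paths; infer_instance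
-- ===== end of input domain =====

-- B replaces A's growing-prefix accumulator + final reverse with a top-down loop that joins the
-- remaining components and drops the last each step (objective: simpler, same cost).


-- ===== PORT A =====
-- path.split('/')[:-1]; grow subpaths front-to-back reading subpaths[-1]; suffix '.smug'; reverse.
def dotsmug_paths (path : String) : List String :=
  let path_splits := PySem.List.slice (PySem.Chars.splitOn path.toList ['/']) none (some (-1))
  let subpaths := path_splits.foldl
    (fun acc split => acc ++ [((PySem.List.pyGet? acc (-1)).getD []) ++ split ++ ['/']])
    [([] : List Char)]
  let results := subpaths.map (fun sp => String.ofList (sp ++ ".smug".toList))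
  results.reverse

-- ===== PORT B =====
-- needed by the port's decreasing_by: parts[:-1] is dropLast
theorem pvSliceDropLast {α : Type} (xs : List α) :
    PySem.List.slice xs none (some (-1)) = xs.dropLast := by
  simp [pysem]

-- while parts: emit '/'.join(parts) + '/.smug'; parts = parts[:-1]; finally emit '.smug'.
def dotsmugAltGo (parts : List (List Char)) : List String :=
  if parts = [] then [String.ofList ".smug".toList]
  else
    String.ofList (PySem.Chars.join ['/'] parts ++ "/.smug".toList)
      :: dotsmugAltGo (PySem.List.slice parts none (some (-1)))
termination_by parts.length
decreasing_by
  rename_i h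
  rw [pvSliceDropLast]
  have := List.length_pos_iff.mpr h
  simp [List.length_dropLast]
  omega

def dotsmug_paths_alt (path : String) : List String :=
  dotsmugAltGo (PySem.List.slice (PySem.Chars.splitOn path.toList ['/']) none (some (-1)))

-- ===== PRECONDITION & SPEC =====
def Spec_dotsmug_paths (path : String) (out : List String) : Prop := out = dotsmug_paths_alt path
instance (path : String) (out : List String) : Decidable (Spec_dotsmug_paths path out) := by unfold Spec_dotsmug_paths; infer_instance

-- ===== CLAIM (what is proved, stated in full; the proofs are below) =====
def Claim_equal_dotsmug_paths : Prop := ∀ (path : String), Dom_dotsmug_paths path → Spec_dotsmug_paths path (dotsmug_paths path)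

-- ===== LEMMAS AND PROOFS =====

-- the list of growing prefixes A's fold appends, starting from prefix `pre`
def pvGrow (pre : List Char) : List (List Char) → List (List Char)
  | [] => []
  | p :: ps => (pre ++ p ++ ['/']) :: pvGrow (pre ++ p ++ ['/']) ps

theorem pvGrow_snoc (pre : List Char) (xs : List (List Char)) (y : List Char) :
    pvGrow pre (xs ++ [y]) =
      pvGrow pre xs ++ [pre ++ (xs.map (· ++ ['/'])).flatten ++ y ++ ['/']] := by
  induction xs generalizing pre with
  | nil => simp [pvGrow]
  | cons a as ih =>
    simp only [List.cons_append, pvGrow, ih]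
    simp

theorem pvGetLastSnoc (acc : List (List Char)) (x : List Char) :
    (PySem.List.pyGet? (acc ++ [x]) (-1)).getD [] = x := by
  simp [PySem.List.pyGet?, PySem.List.pyIdx?]

-- A's fold appends exactly pvGrow of the last accumulator entry
theorem pvFoldGrow (parts : List (List Char)) (acc : List (List Char)) (x : List Char) :
    (parts.foldl
      (fun acc split => acc ++ [((PySem.List.pyGet? acc (-1)).getD []) ++ split ++ ['/']])
      (acc ++ [x])) = (acc ++ [x]) ++ pvGrow x parts := by
  induction parts generalizing acc x with
  | nil => simp [pvGrow]
  | cons p ps ih =>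
    simp only [List.foldl_cons, pvGrow]
    rw [pvGetLastSnoc]
    have := ih (acc ++ [x]) (x ++ p ++ ['/'])
    simpa using this

-- '/'.join(l) + '/' is the concatenation of the components each suffixed '/' (l nonempty)
theorem pvJoinConcat (xs : List (List Char)) (y : List Char) :
    PySem.Chars.join ['/'] (xs ++ [y]) ++ ['/'] =
      ((xs ++ [y]).map (· ++ ['/'])).flatten := by
  induction xs with
  | nil => simp [PySem.Chars.join_singleton]
  | cons a as ih =>
    obtain ⟨b, rest, hbr⟩ : ∃ b rest, as ++ [y] = b :: rest := by
      cases as <;> exact ⟨_, _, rfl⟩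
    rw [List.cons_append, hbr, PySem.Chars.join_cons_cons, ← hbr]
    simp only [List.map_cons, List.flatten_cons, ← ih]
    simp

-- B's loop produces A's reversed suffixed prefix list
theorem pvGoEq (parts : List (List Char)) :
    dotsmugAltGo parts =
      (([([] : List Char)] ++ pvGrow [] parts).map
        (fun sp => String.ofList (sp ++ ".smug".toList))).reverse := by
  induction parts using List.reverseRecOn with
  | nil => rw [dotsmugAltGo]; simp [pvGrow]
  | append_singleton xs y ih =>
    rw [dotsmugAltGo]
    have hne : xs ++ [y] ≠ [] := by simp
    rw [if_neg hne, pvSliceDropLast, List.dropLast_concat, ih, pvGrow_snoc]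
    have hjoin : PySem.Chars.join ['/'] (xs ++ [y]) ++ "/.smug".toList =
        ([] : List Char) ++ (xs.map (· ++ ['/'])).flatten ++ y ++ ['/'] ++ ".smug".toList := by
      have h1 : ("/.smug".toList : List Char) = '/' :: ".smug".toList := by decide
      rw [h1, show PySem.Chars.join ['/'] (xs ++ [y]) ++ '/' :: ".smug".toList =
          (PySem.Chars.join ['/'] (xs ++ [y]) ++ ['/']) ++ ".smug".toList by simp,
        pvJoinConcat]
      simp
    simp only [List.map_append, List.reverse_append, List.map_cons, List.map_nil,
      List.reverse_cons, List.reverse_nil, List.nil_append]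
    rw [hjoin]
    simp

theorem pvMainEq (path : String) : dotsmug_paths path = dotsmug_paths_alt path := by
  show (List.map (fun sp => String.ofList (sp ++ ".smug".toList))
      (List.foldl (fun acc split => acc ++ [((PySem.List.pyGet? acc (-1)).getD []) ++ split ++ ['/']])
        [([] : List Char)]
        (PySem.List.slice (PySem.Chars.splitOn path.toList ['/']) none (some (-1))))).reverse =
    dotsmugAltGo (PySem.List.slice (PySem.Chars.splitOn path.toList ['/']) none (some (-1)))
  rw [pvGoEq]
  have h := pvFoldGrow (PySem.List.slice (PySem.Chars.splitOn path.toList ['/']) none (some (-1))) [] []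
  simp only [List.nil_append] at h
  rw [h]

-- ===== VERDICT (by name: the statement is the Claim_ definition above) =====
theorem dotsmug_paths_spec : Claim_equal_dotsmug_paths := by
  intro path _
  unfold Spec_dotsmug_paths
  exact pvMainEq path
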